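-- pv_equiv track=rewrite | github.com/Poomon001/Competitive-Programming | club python/Detect Capital/main.py | detectCapitalUse_M1
-- ===== SOURCE A (Python) =====
-- def detectCapitalUse_M1(word: str) -> bool:
--     isAllUpper = True
--     isAllLower = True
--     isOnlyFirstUpper = True
--
--     # check if the first char upper case
--     if 'A' <= word[0] <= 'Z':
--         isAllLower = False
--     else:
--         isAllUpper = False
--         isOnlyFirstUpper = False
--
--     # check the rest of character
--     for i in range(1, len(word)):
--         # check if a char upper case
--         if 'A' <= word[i] <= 'Z':
--             isAllLower = False
--             isOnlyFirstUpper = False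
--         else:
--             isAllUpper = False
--
--     return isAllUpper or isAllLower or isOnlyFirstUpper
-- ===== SOURCE B (Python) =====
-- def detectCapitalUse_M1(word: str) -> bool:
--     first_upper = 'A' <= word[0] <= 'Z'
--     up = sum(1 for c in word if 'A' <= c <= 'Z')
--     return up == len(word) or up == 0 or (first_upper and up == 1)
-- ===== Notes on version B (the rewrite author's own statement) =====
-- stated objective: simpler
-- what changed: Replaces the three maintained boolean flags and per-index loop by one aggregate count of ASCII-uppercase characters plus closed-form comparisons (up == len, up == 0, first_upper and up == 1).
import Mathlib
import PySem

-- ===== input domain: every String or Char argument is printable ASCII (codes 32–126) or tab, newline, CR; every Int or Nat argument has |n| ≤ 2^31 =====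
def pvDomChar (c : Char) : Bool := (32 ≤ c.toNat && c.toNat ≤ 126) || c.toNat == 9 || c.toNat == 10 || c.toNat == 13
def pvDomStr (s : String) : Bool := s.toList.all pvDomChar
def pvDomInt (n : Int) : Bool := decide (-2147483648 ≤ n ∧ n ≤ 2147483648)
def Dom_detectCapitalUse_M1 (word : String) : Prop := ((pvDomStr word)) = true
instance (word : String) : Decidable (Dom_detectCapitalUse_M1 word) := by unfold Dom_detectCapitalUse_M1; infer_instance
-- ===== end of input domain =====

-- B replaces A's three maintained flags with one uppercase count and closed-form comparisons (simpler decomposition, same cost).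


-- 'A' <= c <= 'Z' on single-character strings is a code-point comparison; exact on the ASCII domain
def pvIsUp (c : Char) : Bool := decide ('A' ≤ c) && decide (c ≤ 'Z')

-- ===== PORT A =====
-- one loop step of A: update (isAllUpper, isAllLower, isOnlyFirstUpper) for one character
def pvStepA (st : Bool × Bool × Bool) (c : Char) : Bool × Bool × Bool :=
  if pvIsUp c then (st.1, false, false) else (false, st.2.1, st.2.2)

def detectCapitalUse_M1 (word : String) : Bool :=
  match word.toList with
  | [] => false   -- Python raises IndexError on word[0]; excluded by Pre_
  | c :: rest =>
    -- first-character branch sets the initial flags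
    let init : Bool × Bool × Bool :=
      if pvIsUp c then (true, false, true) else (false, true, false)
    -- for i in range(1, len(word)): update the flags
    let fin := rest.foldl pvStepA init
    fin.1 || fin.2.1 || fin.2.2

-- ===== PORT B =====
def detectCapitalUse_M1_alt (word : String) : Bool :=
  match word.toList with
  | [] => false   -- word[0] raises IndexError; excluded by Pre_
  | c :: _ =>
    let firstUpper := pvIsUp c
    let up := (word.toList.filter pvIsUp).length
    decide (up = word.toList.length) || decide (up = 0) || (firstUpper && decide (up = 1))

-- ===== PRECONDITION & SPEC =====
-- Pre_ excludes only the empty string, on which both Pythons raise IndexError at word[0].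
def Pre_detectCapitalUse_M1 (word : String) : Prop := word ≠ ""
instance (word : String) : Decidable (Pre_detectCapitalUse_M1 word) := by unfold Pre_detectCapitalUse_M1; infer_instance
def pvWitness_detectCapitalUse_M1 : String := "Google"

def Spec_detectCapitalUse_M1 (word : String) (out : Bool) : Prop := out = detectCapitalUse_M1_alt word
instance (word : String) (out : Bool) : Decidable (Spec_detectCapitalUse_M1 word out) := by unfold Spec_detectCapitalUse_M1; infer_instance

-- ===== CLAIM (what is proved, stated in full; the proofs are below) =====
def Claim_equal_detectCapitalUse_M1 : Prop := ∀ (word : String), Dom_detectCapitalUse_M1 word → Pre_detectCapitalUse_M1 word → Spec_detectCapitalUse_M1 word (detectCapitalUse_M1 word)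

-- ===== LEMMAS AND PROOFS =====

-- A's loop maintains: each flag survives iff every remaining char keeps it true
theorem pvFoldA_char (l : List Char) (au al of : Bool) :
    l.foldl pvStepA (au, al, of)
      = (au && l.all pvIsUp, al && l.all (fun c => !pvIsUp c), of && l.all (fun c => !pvIsUp c)) := by
  induction l generalizing au al of with
  | nil => simp
  | cons c t ih =>
    simp only [List.foldl_cons, pvStepA, List.all_cons]
    by_cases h : pvIsUp c = true <;> simp [h, ih]

-- ===== VERDICT (by name: the statement is the Claim_ definition above) =====
theorem detectCapitalUse_M1_spec : Claim_equal_detectCapitalUse_M1 := by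
  intro word _ _
  unfold Spec_detectCapitalUse_M1 detectCapitalUse_M1 detectCapitalUse_M1_alt
  cases h : word.toList with
  | nil => rfl
  | cons c rest =>
    have hle : rest.countP pvIsUp ≤ rest.length := List.countP_le_length
    by_cases hc : pvIsUp c = true <;>
      simp only [hc, if_true, if_false, Bool.false_eq_true, pvFoldA_char,
        ← List.countP_eq_length_filter, List.countP_cons, List.length_cons,
        Bool.true_and, Bool.false_and] <;>
    · rw [Bool.eq_iff_iff]
      simp [List.all_eq_true, List.countP_eq_length, List.countP_eq_zero]
      all_goals exact fun hcl => absurd hcl (by omega)
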